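-- pv_equiv track=rewrite | github.com/mnbst/job-recommender | services/github.py | get_config_files
-- ===== SOURCE A (Python) =====
-- CONFIG_FILES = [
--     "Dockerfile",
--     "docker-compose.yml",
--     "docker-compose.yaml",
--     ".github/workflows",
--     "terraform",
--     "Makefile",
--     "tsconfig.json",
--     "webpack.config.js",
--     "vite.config.ts",
-- ]
--
-- def get_config_files(structure: list[str]) -> list[str]:
--     """Identify config files present in the repository.
--
--     Args:
--         structure: List of file paths in the repository
--
--     Returns:
--         List of config file paths found
--     """
--     found: list[str] = []
--
--     for config in CONFIG_FILES:
--         for path in structure: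
--             if path == config or path.startswith(config + "/"):
--                 found.append(path)
--                 break
--
--     return found
-- ===== SOURCE B (Python) =====
-- CONFIG_FILES = [
--     "Dockerfile",
--     "docker-compose.yml",
--     "docker-compose.yaml",
--     ".github/workflows",
--     "terraform",
--     "Makefile",
--     "tsconfig.json",
--     "webpack.config.js",
--     "vite.config.ts",
-- ]
--
-- def get_config_files(structure: list[str]) -> list[str]:
--     """Identify config files present in the repository (single pass over structure)."""
--     found: dict[str, str] = {}
--     for path in structure:
--         for config in CONFIG_FILES:
--             if config not in found and (path == config or path.startswith(config + "/")):
--                 found[config] = path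
--     return [found[c] for c in CONFIG_FILES if c in found]
-- ===== Notes on version B (the rewrite author's own statement) =====
-- stated objective: alternative
-- what changed: Inverts the loop nesting: one pass over structure builds a first-match dict keyed by config, then the result is emitted in CONFIG_FILES order, instead of rescanning structure from the start for every config.
import Mathlib
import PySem

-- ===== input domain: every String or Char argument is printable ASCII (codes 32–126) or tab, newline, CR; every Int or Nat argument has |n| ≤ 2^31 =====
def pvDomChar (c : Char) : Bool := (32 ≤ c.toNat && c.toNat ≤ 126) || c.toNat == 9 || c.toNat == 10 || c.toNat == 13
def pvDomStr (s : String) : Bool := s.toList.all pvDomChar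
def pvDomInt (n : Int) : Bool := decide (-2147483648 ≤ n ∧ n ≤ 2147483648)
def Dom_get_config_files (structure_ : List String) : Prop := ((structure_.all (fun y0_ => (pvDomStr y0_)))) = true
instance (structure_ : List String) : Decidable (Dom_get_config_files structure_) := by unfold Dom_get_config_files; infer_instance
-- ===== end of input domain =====

-- B inverts A's loop nesting: one pass over structure builds a first-match index keyed by config,
-- then results are emitted in CONFIG_FILES order (alternative decomposition, same cost).


-- shared module constant CONFIG_FILES
def pvCONFIG_FILES : List String :=
  ["Dockerfile", "docker-compose.yml", "docker-compose.yaml", ".github/workflows",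
   "terraform", "Makefile", "tsconfig.json", "webpack.config.js", "vite.config.ts"]

-- 'path == config or path.startswith(config + "/")' — exact: startswith on List Char via PySem.Chars
def pvMatch (config path : String) : Bool :=
  path == config || PySem.Chars.startswith path.toList (config.toList ++ ['/'])

-- ===== PORT A =====
-- A's inner 'for path in structure: … break' loop: return first matching path
def pvInnerA (config : String) : List String → Option String
  | [] => none
  | p :: ps => if pvMatch config p then some p else pvInnerA config ps

def get_config_files (structure_ : List String) : List String :=
  pvCONFIG_FILES.foldl
    (fun found config =>
      match pvInnerA config structure_ with
      | some p => found ++ [p]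
      | none => found)
    []

-- ===== PORT B =====
-- B's inner 'for config in CONFIG_FILES: if config not in found and …: found[config] = path'
def pvInnerB (path : String) (d : PySem.Dict String String) : PySem.Dict String String :=
  pvCONFIG_FILES.foldl
    (fun d config =>
      if (!d.contains config) && pvMatch config path then d.insert config path else d)
    d

def get_config_files_alt (structure_ : List String) : List String :=
  let found := structure_.foldl (fun d path => pvInnerB path d) PySem.Dict.empty
  pvCONFIG_FILES.filterMap (fun c => found.get? c)

-- ===== PRECONDITION & SPEC =====
def Spec_get_config_files (structure_ : List String) (out : List String) : Prop := out = get_config_files_alt structure_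
instance (structure_ : List String) (out : List String) : Decidable (Spec_get_config_files structure_ out) := by unfold Spec_get_config_files; infer_instance

-- ===== CLAIM (what is proved, stated in full; the proofs are below) =====
def Claim_equal_get_config_files : Prop := ∀ (structure_ : List String), Dom_get_config_files structure_ → Spec_get_config_files structure_ (get_config_files structure_)

-- ===== LEMMAS AND PROOFS =====

-- A's inner loop is List.find?
theorem pvInnerA_eq_find? (config : String) (s : List String) :
    pvInnerA config s = s.find? (fun p => pvMatch config p) := by
  induction s with
  | nil => rfl
  | cons p ps ih => simp [pvInnerA, List.find?_cons, ih]; split <;> simp_all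

-- effect of B's inner fold on one lookup key
theorem pvInnerB_fold_get? (cs : List String) (path : String) (d : PySem.Dict String String)
    (c : String) :
    (cs.foldl (fun d config =>
        if (!d.contains config) && pvMatch config path then d.insert config path else d) d).get? c
      = if c ∈ cs ∧ d.get? c = none ∧ pvMatch c path then some path else d.get? c := by
  induction cs generalizing d with
  | nil => simp
  | cons k rest ih =>
    simp only [List.foldl_cons, ih]
    by_cases hck : c = k
    · subst hck
      by_cases hd : d.get? c = none
      · by_cases hm : pvMatch c path = true
        · simp [PySem.Dict.contains_eq_isSome_get?, hd, hm, PySem.Dict.get?_insert_self]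
        · simp [PySem.Dict.contains_eq_isSome_get?, hd, hm]
      · simp [PySem.Dict.contains_eq_isSome_get?, Option.isSome_iff_ne_none.mpr hd, hd]
    · have : ∀ d' : PySem.Dict String String,
          ((if (!d'.contains k) && pvMatch k path then d'.insert k path else d').get? c)
            = d'.get? c := by
        intro d'; split
        · exact PySem.Dict.get?_insert_of_ne d' path hck
        · rfl
      rw [this]
      simp [hck]

theorem pvInnerB_get? (path : String) (d : PySem.Dict String String) (c : String) :
    (pvInnerB path d).get? c
      = if c ∈ pvCONFIG_FILES ∧ d.get? c = none ∧ pvMatch c path then some path else d.get? c :=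
  pvInnerB_fold_get? pvCONFIG_FILES path d c

-- the outer pass: the dict holds the FIRST matching path for each config
theorem pvOuter_get? (s : List String) (d : PySem.Dict String String) (c : String)
    (hc : c ∈ pvCONFIG_FILES) :
    (s.foldl (fun d path => pvInnerB path d) d).get? c
      = (d.get? c).or (s.find? (fun p => pvMatch c p)) := by
  induction s generalizing d with
  | nil => simp
  | cons p ps ih =>
    simp only [List.foldl_cons, ih, pvInnerB_get? p d c, List.find?_cons]
    by_cases hd : d.get? c = none
    · by_cases hm : pvMatch c p = true
      · simp [hc, hd, hm]
      · simp [hc, hd, hm]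
    · obtain ⟨v, hv⟩ := Option.ne_none_iff_exists'.mp hd
      simp [hv]

-- a foldl that appends each found option is a filterMap
theorem pvFoldl_append_filterMap (cs : List String) (f : String → Option String)
    (acc : List String) :
    cs.foldl (fun found config =>
        match f config with
        | some p => found ++ [p]
        | none => found) acc
      = acc ++ cs.filterMap f := by
  induction cs generalizing acc with
  | nil => simp
  | cons k rest ih =>
    simp only [List.foldl_cons, ih, List.filterMap_cons]
    cases f k <;> simp

theorem pvFilterMap_congr_mem (cs : List String) (f g : String → Option String)
    (h : ∀ c ∈ cs, f c = g c) : cs.filterMap f = cs.filterMap g := by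
  induction cs with
  | nil => rfl
  | cons k rest ih =>
    simp only [List.filterMap_cons, h k (by simp), ih (fun c hc => h c (by simp [hc]))]

-- ===== VERDICT (by name: the statement is the Claim_ definition above) =====
theorem get_config_files_spec : Claim_equal_get_config_files := by
  intro structure_ _
  unfold Spec_get_config_files get_config_files get_config_files_alt
  rw [pvFoldl_append_filterMap pvCONFIG_FILES (fun c => pvInnerA c structure_) []]
  simp only [List.nil_append]
  apply pvFilterMap_congr_mem
  intro c hc
  rw [pvInnerA_eq_find? c structure_, pvOuter_get? structure_ PySem.Dict.empty c hc]
  simp
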